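-- pv_equiv track=rewrite | github.com/MariyaMoiseeva/SimulatedAnnealing | SA.py | costNI
-- ===== SOURCE A (Python) =====
-- def costNI(I,a,b):
--     sum1 = a
--     sum2 = b
--     for i in range(0, len(I)):
--         sum1 = sum1 + I[i][0][1]
--         if sum1 > sum2:
--             sum2 = (sum2 - sum1) + sum2 + I[i][1][1]
--         else:
--             sum2 = sum2 + I[i][1][1]
--
--     return sum1, sum2
-- ===== SOURCE B (Python) =====
-- def costNI(I, a, b):
--     # B: two-phase decomposition - first materialize the running sum1 prefixes,
--     # then a second pass computes sum2 against those prefixes.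
--     prefixes = []
--     s = a
--     for x in I:
--         s = s + x[0][1]
--         prefixes.append(s)
--     sum2 = b
--     for p, x in zip(prefixes, I):
--         if p > sum2:
--             sum2 = 2 * sum2 - p + x[1][1]
--         else:
--             sum2 = sum2 + x[1][1]
--     return (prefixes[-1] if I else a), sum2
-- ===== Notes on version B (the rewrite author's own statement) =====
-- stated objective: alternative
-- what changed: Replaces the single loop carrying both sums with a two-phase decomposition: first build the list of running sum1 prefixes, then a second pass folds sum2 over the prefixes (with the update rewritten as 2*sum2 - p), returning the last prefix as sum1.
import Mathlib
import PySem

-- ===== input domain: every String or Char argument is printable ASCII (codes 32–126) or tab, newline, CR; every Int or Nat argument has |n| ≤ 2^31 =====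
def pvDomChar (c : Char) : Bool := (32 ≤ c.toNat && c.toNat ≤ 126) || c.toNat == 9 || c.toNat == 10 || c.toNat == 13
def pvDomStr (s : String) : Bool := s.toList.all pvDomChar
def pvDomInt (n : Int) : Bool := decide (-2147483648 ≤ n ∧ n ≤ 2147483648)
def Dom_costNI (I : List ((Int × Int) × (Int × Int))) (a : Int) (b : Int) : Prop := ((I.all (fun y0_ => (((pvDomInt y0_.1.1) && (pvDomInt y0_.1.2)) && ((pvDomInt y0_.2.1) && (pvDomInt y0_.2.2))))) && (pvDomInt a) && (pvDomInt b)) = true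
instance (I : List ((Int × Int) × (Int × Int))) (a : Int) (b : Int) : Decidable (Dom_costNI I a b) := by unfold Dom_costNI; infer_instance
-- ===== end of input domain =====

-- B replaces A's single combined loop by a two-phase decomposition (prefix list of sum1, then a fold for sum2); objective: alternative.


-- ===== PORT A =====
-- literal transliteration: one loop over I carrying (sum1, sum2)
def costNI (I : List ((Int × Int) × (Int × Int))) (a : Int) (b : Int) : Int × Int :=
  I.foldl (fun (p : Int × Int) x =>
    let sum1 := p.1 + x.1.2
    let sum2 := if sum1 > p.2 then (p.2 - sum1) + p.2 + x.2.2 else p.2 + x.2.2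
    (sum1, sum2)) (a, b)

-- ===== PORT B =====
-- phase 1: the list of running sum1 prefixes (Source B's first loop, append = cons-building recursion)
def costNIPref (I : List ((Int × Int) × (Int × Int))) (s : Int) : List Int :=
  match I with
  | [] => []
  | x :: r => let s' := s + x.1.2; s' :: costNIPref r s'

-- phase 2 + final pair, following Source B's second loop over zip(prefixes, I)
def costNI_alt (I : List ((Int × Int) × (Int × Int))) (a : Int) (b : Int) : Int × Int :=
  let prefixes := costNIPref I a
  let sum2 := (prefixes.zip I).foldl
    (fun s2 px => if px.1 > s2 then 2 * s2 - px.1 + px.2.2.2 else s2 + px.2.2.2) b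
  ((prefixes.getLastD a), sum2)

-- ===== PRECONDITION & SPEC =====
def Spec_costNI (I : List ((Int × Int) × (Int × Int))) (a : Int) (b : Int) (out : Int × Int) : Prop := out = costNI_alt I a b
instance (I : List ((Int × Int) × (Int × Int))) (a : Int) (b : Int) (out : Int × Int) : Decidable (Spec_costNI I a b out) := by unfold Spec_costNI; infer_instance

-- ===== CLAIM (what is proved, stated in full; the proofs are below) =====
def Claim_equal_costNI : Prop := ∀ (I : List ((Int × Int) × (Int × Int))) (a : Int) (b : Int), Dom_costNI I a b → Spec_costNI I a b (costNI I a b)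

-- ===== LEMMAS AND PROOFS =====

theorem costNI_alt_cons (x : (Int × Int) × (Int × Int)) (r : List ((Int × Int) × (Int × Int))) (a b : Int) :
    costNI_alt (x :: r) a b
      = costNI_alt r (a + x.1.2)
          (if a + x.1.2 > b then 2 * b - (a + x.1.2) + x.2.2 else b + x.2.2) := by
  simp only [costNI_alt, costNIPref, List.zip_cons_cons, List.foldl_cons, List.getLastD_cons]

theorem costNI_eq_alt (I : List ((Int × Int) × (Int × Int))) (a b : Int) :
    costNI I a b = costNI_alt I a b := by
  induction I generalizing a b with
  | nil => simp [costNI, costNI_alt, costNIPref]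
  | cons x r ih =>
      rw [costNI_alt_cons]
      show costNI r (a + x.1.2) _ = _
      rw [ih]
      by_cases h : a + x.1.2 > b <;> simp [h] <;> ring_nf

-- ===== VERDICT (by name: the statement is the Claim_ definition above) =====
theorem costNI_spec : Claim_equal_costNI := by
  intro I a b _
  unfold Spec_costNI
  exact costNI_eq_alt I a b
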